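-- pv_equiv track=rewrite | github.com/PhilHem/datacachalog | src/datacachalog/core/glob_utils.py | split_glob_pattern
-- ===== SOURCE A (Python) =====
-- _GLOB_METACHARACTERS = frozenset("*?[")
--
-- def is_glob_pattern(source: str) -> bool:
--     """Check if a source string contains glob metacharacters.
--
--     Args:
--         source: A URI or path that may contain glob patterns.
--
--     Returns:
--         True if source contains *, ?, or [ characters.
--     """
--     return any(char in source for char in _GLOB_METACHARACTERS)
--
-- def split_glob_pattern(source: str) -> tuple[str, str]:
--     """Split a glob source into prefix and pattern.
--
--     Splits at the last / before the first glob metacharacter.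
--
--     Args:
--         source: A URI or path containing glob pattern (e.g., "s3://bucket/data/*.parquet").
--
--     Returns:
--         Tuple of (prefix, pattern) where:
--         - prefix: The path up to and including the last / before glob chars
--         - pattern: The glob pattern portion
--
--     Raises:
--         ValueError: If source doesn't contain glob metacharacters.
--
--     Examples:
--         >>> split_glob_pattern("s3://bucket/data/*.parquet")
--         ("s3://bucket/data/", "*.parquet")
--         >>> split_glob_pattern("s3://bucket/data/**/*.parquet")
--         ("s3://bucket/data/", "**/*.parquet")
--     """
--     if not is_glob_pattern(source):
--         raise ValueError(f"Source is not a glob pattern: {source}")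
--
--     # Find the first glob metacharacter
--     first_glob_pos = len(source)
--     for char in _GLOB_METACHARACTERS:
--         pos = source.find(char)
--         if pos != -1 and pos < first_glob_pos:
--             first_glob_pos = pos
--
--     # Find the last / before the glob metacharacter
--     last_slash = source.rfind("/", 0, first_glob_pos)
--
--     if last_slash == -1:
--         # No slash before glob - entire thing is pattern
--         return "", source
--
--     # Split at the last slash
--     prefix = source[: last_slash + 1]  # Include the trailing /
--     pattern = source[last_slash + 1 :]
--
--     return prefix, pattern
-- ===== SOURCE B (Python) =====
-- _GLOB_METACHARACTERS = frozenset("*?[")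
--
--
-- def split_glob_pattern(source: str) -> tuple[str, str]:
--     """Single forward pass: track the last '/' seen and stop at the first glob metacharacter."""
--     last_slash = -1
--     for i, ch in enumerate(source):
--         if ch in _GLOB_METACHARACTERS:
--             if last_slash == -1:
--                 return "", source
--             return source[: last_slash + 1], source[last_slash + 1 :]
--         if ch == "/":
--             last_slash = i
--     raise ValueError(f"Source is not a glob pattern: {source}")
-- ===== Notes on version B (the rewrite author's own statement) =====
-- stated objective: alternative
-- what changed: Replaces A's three separate scans (membership guard via is_glob_pattern, per-metacharacter find with a min, then rfind for the last slash) by one fused forward pass that tracks the index of the most recent slash and returns at the first metacharacter.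
import Mathlib
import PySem

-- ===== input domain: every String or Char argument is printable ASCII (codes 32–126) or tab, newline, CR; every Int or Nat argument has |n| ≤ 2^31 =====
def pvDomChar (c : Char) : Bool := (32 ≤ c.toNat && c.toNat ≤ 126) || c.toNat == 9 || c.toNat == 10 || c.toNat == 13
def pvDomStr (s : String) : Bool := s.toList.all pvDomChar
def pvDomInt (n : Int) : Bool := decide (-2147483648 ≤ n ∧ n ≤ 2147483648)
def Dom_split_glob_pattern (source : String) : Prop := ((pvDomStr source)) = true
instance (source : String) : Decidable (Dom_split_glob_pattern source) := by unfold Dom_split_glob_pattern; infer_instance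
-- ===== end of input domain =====

-- B fuses A's three scans (glob-membership guard, per-metacharacter find + min, rfind of the last
-- slash) into one forward pass tracking the most recent slash and stopping at the first metacharacter.


-- ===== PORT A =====
-- hand port of source.find(char): exact because the needle is a single character
def findChar (cs : List Char) (c : Char) : Int :=
  match cs with
  | [] => -1
  | x :: rest => if x = c then 0 else (let r := findChar rest c; if r = -1 then -1 else r + 1)

-- hand port of source.rfind("/", 0, stop): exact for 0 ≤ stop (here stop = first_glob_pos ≥ 0)
def rfindCharBefore (cs : List Char) (c : Char) (stop : Int) : Int :=
  (PySem.List.enumerate cs).foldl (fun acc p => if p.2 = c ∧ p.1 < stop then p.1 else acc) (-1)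

-- any(char in source for char in _GLOB_METACHARACTERS); 'char in source' is membership for 1-char needles
def is_glob_pattern (source : String) : Bool :=
  (['*', '?', '['] : List Char).any (fun c => source.toList.contains c)

def split_glob_pattern (source : String) : String × String :=
  if is_glob_pattern source = false then ("", "")  -- Python raises ValueError here; excluded by Pre_
  else
    let cs := source.toList
    let first := (['*', '?', '['] : List Char).foldl
      (fun fp c => let pos := findChar cs c; if pos ≠ -1 ∧ pos < fp then pos else fp)
      ((cs.length : Int))
    let lastSlash := rfindCharBefore cs '/' first
    if lastSlash = -1 then ("", source)
    else (String.ofList (PySem.List.slice cs none (some (lastSlash + 1))),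
          String.ofList (PySem.List.slice cs (some (lastSlash + 1)) none))

-- ===== PORT B =====
-- the single forward loop of Source B: index i, last slash seen; some lastSlash at the first metacharacter
def altGo (cs : List Char) (i : Int) (lastSlash : Int) : Option Int :=
  match cs with
  | [] => none
  | c :: rest =>
    if c == '*' || c == '?' || c == '[' then some lastSlash
    else altGo rest (i + 1) (if c == '/' then i else lastSlash)

def split_glob_pattern_alt (source : String) : String × String :=
  match altGo source.toList 0 (-1) with
  | none => ("", "")  -- Python raises ValueError here; excluded by Pre_
  | some ls =>
    if ls = -1 then ("", source)
    else (String.ofList (PySem.List.slice source.toList none (some (ls + 1))),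
          String.ofList (PySem.List.slice source.toList (some (ls + 1)) none))

-- ===== PRECONDITION & SPEC =====
-- Pre_ excludes exactly the sources without a glob metacharacter, on which A raises ValueError.
def Pre_split_glob_pattern (source : String) : Prop :=
  (source.toList.any (fun c => c == '*' || c == '?' || c == '[')) = true
instance (source : String) : Decidable (Pre_split_glob_pattern source) := by
  unfold Pre_split_glob_pattern; infer_instance
def pvWitness_split_glob_pattern : String := "a/*"

def Spec_split_glob_pattern (source : String) (out : String × String) : Prop := out = split_glob_pattern_alt source
instance (source : String) (out : String × String) : Decidable (Spec_split_glob_pattern source out) := by unfold Spec_split_glob_pattern; infer_instance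

-- ===== CLAIM (what is proved, stated in full; the proofs are below) =====
def Claim_equal_split_glob_pattern : Prop := ∀ (source : String), Dom_split_glob_pattern source → Pre_split_glob_pattern source → Spec_split_glob_pattern source (split_glob_pattern source)

-- ===== LEMMAS AND PROOFS =====

-- proof-only: the state evolution of B's loop on the metacharacter-free prefix
def lsFold : List Char → Int → Int → Int
  | [], _, ls => ls
  | c :: r, i, ls => lsFold r (i + 1) (if c == '/' then i else ls)

lemma findChar_cons_ne (x : Char) (rest : List Char) (c : Char) (h : x ≠ c) :
    findChar (x :: rest) c =
      (if findChar rest c = -1 then -1 else findChar rest c + 1) := by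
  simp [findChar, h]

lemma findChar_cases (cs : List Char) (c : Char) :
    findChar cs c = -1 ∨ (0 ≤ findChar cs c ∧ findChar cs c < cs.length) := by
  induction cs with
  | nil => left; rfl
  | cons x rest ih =>
    by_cases h : x = c
    · subst h
      right
      refine ⟨by simp [findChar], ?_⟩
      simp only [findChar, List.length_cons]
      push_cast
      omega
    · rw [findChar_cons_ne x rest c h]
      simp only [List.length_cons]
      push_cast
      rcases ih with h1 | h1 <;> split_ifs <;> omega

lemma shift_step (fp pos : Int) (hfp : 0 ≤ fp) (hpos : pos = -1 ∨ 0 ≤ pos) :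
    (if (if pos = -1 then -1 else pos + 1) ≠ -1 ∧ (if pos = -1 then -1 else pos + 1) < fp + 1
      then (if pos = -1 then -1 else pos + 1) else fp + 1)
    = (if pos ≠ -1 ∧ pos < fp then pos else fp) + 1 := by
  split_ifs <;> omega

lemma step_nonneg (fp pos : Int) (hfp : 0 ≤ fp) (hpos : pos = -1 ∨ 0 ≤ pos) :
    0 ≤ (if pos ≠ -1 ∧ pos < fp then pos else fp) := by
  split_ifs <;> omega

lemma afold_eq (cs : List Char) :
    (['*', '?', '['] : List Char).foldl
      (fun fp c => let pos := findChar cs c; if pos ≠ -1 ∧ pos < fp then pos else fp)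
      ((cs.length : Int))
    = ((cs.takeWhile (fun c => !(c == '*' || c == '?' || c == '['))).length : Int) := by
  induction cs with
  | nil => simp [findChar, List.foldl]
  | cons x rest ih =>
    simp only [List.foldl] at ih ⊢
    by_cases hm : (x == '*' || x == '?' || x == '[') = true
    · -- x is a metacharacter: the first position is 0
      have hz : findChar (x :: rest) '*' = 0 ∨ findChar (x :: rest) '?' = 0 ∨
          findChar (x :: rest) '[' = 0 := by
        have hm' : x = '*' ∨ x = '?' ∨ x = '[' := by
          simpa [beq_iff_eq, or_assoc] using hm
        rcases hm' with h | h | h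
        · left; simp [findChar, h]
        · right; left; simp [findChar, h]
        · right; right; simp [findChar, h]
      have ht : (x :: rest).takeWhile (fun c => !(c == '*' || c == '?' || c == '[')) = [] := by
        rw [List.takeWhile_cons, if_neg (by simp [hm])]
      rw [ht]
      have h1 := findChar_cases (x :: rest) '*'
      have h2 := findChar_cases (x :: rest) '?'
      have h3 := findChar_cases (x :: rest) '['
      generalize hA : findChar (x :: rest) '*' = a at h1 hz ⊢
      generalize hB : findChar (x :: rest) '?' = b at h2 hz ⊢
      generalize hC : findChar (x :: rest) '[' = c at h3 hz ⊢
      simp only [List.length_cons, List.length_nil] at h1 h2 h3 ⊢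
      push_cast at h1 h2 h3 ⊢
      split_ifs <;> omega
    · -- x is not a metacharacter: everything shifts by one
      have hne1 : x ≠ '*' := by intro h; subst h; simp at hm
      have hne2 : x ≠ '?' := by intro h; subst h; simp at hm
      have hne3 : x ≠ '[' := by intro h; subst h; simp at hm
      have ht : (x :: rest).takeWhile (fun c => !(c == '*' || c == '?' || c == '[')) =
          x :: rest.takeWhile (fun c => !(c == '*' || c == '?' || c == '[')) := by
        rw [List.takeWhile_cons, if_pos (by simp [hne1, hne2, hne3])]
      rw [ht, findChar_cons_ne x rest '*' hne1, findChar_cons_ne x rest '?' hne2,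
        findChar_cons_ne x rest '[' hne3]
      have h1 : findChar rest '*' = -1 ∨ 0 ≤ findChar rest '*' := by
        rcases findChar_cases rest '*' with h | h; exacts [Or.inl h, Or.inr h.1]
      have h2 : findChar rest '?' = -1 ∨ 0 ≤ findChar rest '?' := by
        rcases findChar_cases rest '?' with h | h; exacts [Or.inl h, Or.inr h.1]
      have h3 : findChar rest '[' = -1 ∨ 0 ≤ findChar rest '[' := by
        rcases findChar_cases rest '[' with h | h; exacts [Or.inl h, Or.inr h.1]
      have hn : (0 : Int) ≤ (rest.length : Int) := by positivity
      simp only [List.length_cons]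
      push_cast
      rw [shift_step _ _ hn h1, shift_step _ _ (step_nonneg _ _ hn h1) h2,
        shift_step _ _ (step_nonneg _ _ (step_nonneg _ _ hn h1) h2) h3, ih]

lemma altGo_eq (cs : List Char) :
    ∀ i ls : Int, (cs.any (fun c => c == '*' || c == '?' || c == '[')) = true →
      altGo cs i ls = some (lsFold (cs.takeWhile (fun c => !(c == '*' || c == '?' || c == '['))) i ls) := by
  induction cs with
  | nil => intro i ls h; simp at h
  | cons x rest ih =>
    intro i ls h
    by_cases hm : (x == '*' || x == '?' || x == '[') = true
    · rw [List.takeWhile_cons, if_neg (by simp [hm])]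
      simp only [altGo, hm, if_true, lsFold]
    · have hb : (x == '*' || x == '?' || x == '[') = false := eq_false_of_ne_true hm
      have hrest : (rest.any (fun c => c == '*' || c == '?' || c == '[')) = true := by
        rcases (by simpa using h : (x == '*' || x == '?' || x == '[') = true ∨ _) with h' | h'
        · exact absurd h' hm
        · simpa using h'
      rw [List.takeWhile_cons, if_pos (by simp [hb])]
      simp only [altGo, hb, Bool.false_eq_true, if_false, lsFold]
      exact ih _ _ hrest

lemma enumFold_ge (stop : Int) :
    ∀ (suf : List Char) (i acc : Int), stop ≤ i →
      (PySem.List.enumerate suf i).foldl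
        (fun acc p => if p.2 = '/' ∧ p.1 < stop then p.1 else acc) acc = acc := by
  intro suf
  induction suf with
  | nil => intro i acc _; simp [PySem.List.enumerate_nil]
  | cons c r ih =>
    intro i acc h
    rw [PySem.List.enumerate_cons]
    simp only [List.foldl_cons]
    rw [if_neg (by intro hh; omega)]
    exact ih (i + 1) acc (by omega)

lemma enumFold_pre (stop : Int) :
    ∀ (pre suf : List Char) (i acc : Int), i + (pre.length : Int) = stop →
      (PySem.List.enumerate (pre ++ suf) i).foldl
        (fun acc p => if p.2 = '/' ∧ p.1 < stop then p.1 else acc) acc = lsFold pre i acc := by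
  intro pre
  induction pre with
  | nil =>
    intro suf i acc h
    simp only [List.nil_append, lsFold]
    exact enumFold_ge stop suf i acc (by simp at h; omega)
  | cons c r ih =>
    intro suf i acc h
    simp only [List.length_cons] at h
    push_cast at h
    simp only [List.cons_append]
    rw [PySem.List.enumerate_cons]
    simp only [List.foldl_cons, lsFold]
    have hi : i < stop := by omega
    by_cases hc : c = '/'
    · rw [if_pos ⟨hc, hi⟩, if_pos (by simp [hc])]
      exact ih suf (i + 1) i (by omega)
    · rw [if_neg (by intro hh; exact hc hh.1), if_neg (by simp [hc])]
      exact ih suf (i + 1) acc (by omega)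

lemma rfind_eq_lsFold (cs : List Char) :
    rfindCharBefore cs '/'
        (((cs.takeWhile (fun c => !(c == '*' || c == '?' || c == '['))).length : Int))
      = lsFold (cs.takeWhile (fun c => !(c == '*' || c == '?' || c == '['))) 0 (-1) := by
  have h := enumFold_pre
    (((cs.takeWhile (fun c => !(c == '*' || c == '?' || c == '['))).length : Int))
    (cs.takeWhile (fun c => !(c == '*' || c == '?' || c == '[')))
    (cs.dropWhile (fun c => !(c == '*' || c == '?' || c == '['))) 0 (-1) (by omega)
  rw [List.takeWhile_append_dropWhile] at h
  exact h

lemma is_glob_eq (source : String) :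
    is_glob_pattern source = source.toList.any (fun c => c == '*' || c == '?' || c == '[') := by
  rw [Bool.eq_iff_iff]
  simp only [is_glob_pattern, List.any_eq_true, List.contains_iff_mem, List.mem_cons,
    List.not_mem_nil, or_false, Bool.or_eq_true, beq_iff_eq]
  aesop

-- ===== VERDICT (by name: the statement is the Claim_ definition above) =====
theorem split_glob_pattern_spec : Claim_equal_split_glob_pattern := by
  intro source _ hpre
  unfold Spec_split_glob_pattern split_glob_pattern split_glob_pattern_alt
  unfold Pre_split_glob_pattern at hpre
  rw [is_glob_eq source, hpre]
  simp only [Bool.true_eq_false, if_false]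
  rw [afold_eq source.toList, rfind_eq_lsFold source.toList, altGo_eq source.toList 0 (-1) hpre]
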